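-- pv_equiv track=rewrite | github.com/efetoros/Structure-and-Interpretation-of-Computer-Programs-HWs | hw04/problems/hw04.py | has_seven_or_multiple
-- ===== SOURCE A (Python) =====
-- def has_seven_or_multiple(k):
--     """Returns True if at least one of the digits of k is a 7, False otherwise.
--
--     >>> has_seven(3)
--     False
--     >>> has_seven(7)
--     True
--     >>> has_seven(2734)
--     True
--     >>> has_seven(2634)
--     False
--     >>> has_seven(734)
--     True
--     >>> has_seven(7777)
--     True
--     """
--     if k % 10 == 7:
--         return True
--     elif k%7 == 0:
--         return True
--     elif k < 10:
--         return False
--     else: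
--         return has_seven_or_multiple(k // 10)
-- ===== SOURCE B (Python) =====
-- def has_seven_or_multiple(k):
--     # Build the list of decimal truncations of k, then test them with any().
--     prefixes = [k]
--     while prefixes[-1] >= 10:
--         prefixes.append(prefixes[-1] // 10)
--     return any(p % 10 == 7 or p % 7 == 0 for p in prefixes)
-- ===== Notes on version B (the rewrite author's own statement) =====
-- stated objective: alternative
-- what changed: Replaced the tail recursion over branch-ordered early returns by first materialising the list of decimal truncations of k and then testing them with a single any() over a disjunction.
import Mathlib
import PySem

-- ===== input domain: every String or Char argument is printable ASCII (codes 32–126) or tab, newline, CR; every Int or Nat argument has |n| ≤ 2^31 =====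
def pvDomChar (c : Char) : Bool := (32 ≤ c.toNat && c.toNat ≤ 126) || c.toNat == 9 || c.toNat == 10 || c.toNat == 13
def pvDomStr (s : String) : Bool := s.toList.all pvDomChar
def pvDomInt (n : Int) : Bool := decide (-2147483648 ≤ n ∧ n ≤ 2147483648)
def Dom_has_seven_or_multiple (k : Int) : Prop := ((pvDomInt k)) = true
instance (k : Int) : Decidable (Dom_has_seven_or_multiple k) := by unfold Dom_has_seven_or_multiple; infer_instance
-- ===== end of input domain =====

-- B replaces A's branch-ordered tail recursion by building the list of decimal truncations and testing it with a single any(); objective: alternative decomposition, same cost.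

-- ===== PORT A =====
def has_seven_or_multiple (k : Int) : Bool :=
  if PySem.Int.mod k 10 == 7 then true
  else if PySem.Int.mod k 7 == 0 then true
  else if k < 10 then false
  else has_seven_or_multiple (PySem.Int.floordiv k 10)
termination_by k.toNat
decreasing_by
  simp only [PySem.Int.floordiv, Int.fdiv_eq_ediv]
  omega

-- ===== PORT B =====
-- while-loop of Source B building the truncation list, as structural recursion
def pvTruncations (k : Int) : List Int :=
  if k < 10 then [k]
  else k :: pvTruncations (PySem.Int.floordiv k 10)
termination_by k.toNat
decreasing_by
  simp only [PySem.Int.floordiv, Int.fdiv_eq_ediv]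
  omega

def has_seven_or_multiple_alt (k : Int) : Bool :=
  (pvTruncations k).any (fun p => PySem.Int.mod p 10 == 7 || PySem.Int.mod p 7 == 0)

-- ===== PRECONDITION & SPEC =====
def Spec_has_seven_or_multiple (k : Int) (out : Bool) : Prop := out = has_seven_or_multiple_alt k
instance (k : Int) (out : Bool) : Decidable (Spec_has_seven_or_multiple k out) := by unfold Spec_has_seven_or_multiple; infer_instance

-- ===== CLAIM (what is proved, stated in full; the proofs are below) =====
def Claim_equal_has_seven_or_multiple : Prop := ∀ (k : Int), Dom_has_seven_or_multiple k → Spec_has_seven_or_multiple k (has_seven_or_multiple k)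

-- ===== LEMMAS AND PROOFS =====

-- ===== VERDICT (by name: the statement is the Claim_ definition above) =====
theorem pv_eq (k : Int) : has_seven_or_multiple k = has_seven_or_multiple_alt k := by
  unfold has_seven_or_multiple has_seven_or_multiple_alt pvTruncations
  by_cases h : k < 10
  · rw [if_pos h, if_pos h]
    simp only [List.any_cons, List.any_nil, Bool.or_false]
    generalize (PySem.Int.mod k 10 == 7) = c1
    generalize (PySem.Int.mod k 7 == 0) = c2
    cases c1 <;> cases c2 <;> simp
  · rw [if_neg h, if_neg h, pv_eq (PySem.Int.floordiv k 10)]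
    unfold has_seven_or_multiple_alt
    simp only [List.any_cons]
    generalize (PySem.Int.mod k 10 == 7) = c1
    generalize (PySem.Int.mod k 7 == 0) = c2
    generalize ((pvTruncations (PySem.Int.floordiv k 10)).any
      (fun p => PySem.Int.mod p 10 == 7 || PySem.Int.mod p 7 == 0)) = r
    cases c1 <;> cases c2 <;> cases r <;> simp
termination_by k.toNat
decreasing_by
  simp only [PySem.Int.floordiv, Int.fdiv_eq_ediv]
  omega

theorem has_seven_or_multiple_spec : Claim_equal_has_seven_or_multiple := by
  intro k _
  unfold Spec_has_seven_or_multiple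
  exact pv_eq k
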